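-- pv_equiv track=rewrite | github.com/kxnjo/csf-steganography | decode_audio/audio_encode.py | embed_header
-- ===== SOURCE A (Python) =====
-- def embed_header(audio_data, header_bits, num_lsb):
--     """Embed header bits sequentially into the first samples"""
--     bit_idx = 0
--     for i in range(len(audio_data)):
--         sample = audio_data[i]
--         for l in range(num_lsb):
--             if bit_idx >= len(header_bits):
--                 break
--             sample = sample & ~(1 << l)
--             sample = sample | (header_bits[bit_idx] << l)
--             bit_idx += 1
--         audio_data[i] = sample
--         if bit_idx >= len(header_bits):
--             break
--     return audio_data
-- ===== SOURCE B (Python) =====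
-- def embed_header(audio_data, header_bits, num_lsb):
--     """Embed header bits sequentially into the first samples.
--     Single flat loop over bit indices: sample index and bit position come
--     from divmod, and each element is written in place."""
--     if num_lsb <= 0:
--         return audio_data
--     for bit_idx in range(len(header_bits)):
--         i, l = divmod(bit_idx, num_lsb)
--         if i >= len(audio_data):
--             break
--         audio_data[i] = (audio_data[i] & ~(1 << l)) | (header_bits[bit_idx] << l)
--     return audio_data
-- ===== Notes on version B (the rewrite author's own statement) =====
-- stated objective: simpler
-- what changed: Replaces the nested sample/bit loops with a running accumulator and two break checks by one flat loop over bit indices that derives (sample, bit position) via divmod and writes each element in place; num_lsb <= 0 is handled by an upfront guard instead of an empty inner range.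
import Mathlib
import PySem

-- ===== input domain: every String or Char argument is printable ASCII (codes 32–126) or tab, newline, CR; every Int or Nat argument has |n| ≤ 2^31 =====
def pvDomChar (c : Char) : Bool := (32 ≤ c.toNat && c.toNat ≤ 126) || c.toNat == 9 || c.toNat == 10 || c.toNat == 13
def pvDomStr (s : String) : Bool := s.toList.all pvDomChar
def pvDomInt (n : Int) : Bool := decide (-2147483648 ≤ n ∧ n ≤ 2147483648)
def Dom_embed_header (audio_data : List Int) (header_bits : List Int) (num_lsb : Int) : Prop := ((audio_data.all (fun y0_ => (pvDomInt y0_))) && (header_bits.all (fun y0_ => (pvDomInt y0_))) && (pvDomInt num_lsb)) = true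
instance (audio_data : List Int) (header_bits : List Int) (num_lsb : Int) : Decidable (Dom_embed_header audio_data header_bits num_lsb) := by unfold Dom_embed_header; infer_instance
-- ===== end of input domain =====

-- B replaces A's nested loops by one flat loop over bit indices (divmod gives the
-- sample index and bit position); objective: simpler. Both Pythons mutate
-- audio_data in place the same way; equivalence here is about the return value.

-- ===== PORT A =====
-- inner loop `for l in range(num_lsb)` of A: state (sample, bit_idx), break when
-- bit_idx >= len(header_bits); header_bits[bit_idx] is in range when read (guarded).
def pvInnerA (hb : List Int) : List Nat → Int → Nat → Int × Nat
  | [], sample, bitIdx => (sample, bitIdx)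
  | l :: ls, sample, bitIdx =>
    if hb.length ≤ bitIdx then (sample, bitIdx)
    else pvInnerA hb ls
      (PySem.Int.bor (PySem.Int.band sample (Int.not ((1 : Int) <<< l))) ((hb.getD bitIdx 0) <<< l))
      (bitIdx + 1)

-- outer loop `for i in range(len(audio_data))` of A, with its post-write break.
def pvOuterA (hb : List Int) (nl : Nat) : List Int → Nat → List Int
  | [], _ => []
  | a :: rest, bitIdx =>
    let p := pvInnerA hb (List.range nl) a bitIdx
    if hb.length ≤ p.2 then p.1 :: rest
    else p.1 :: pvOuterA hb nl rest p.2

def embed_header (audio_data : List Int) (header_bits : List Int) (num_lsb : Int) : List Int :=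
  -- range(num_lsb) is empty for num_lsb ≤ 0, exactly List.range num_lsb.toNat
  pvOuterA header_bits num_lsb.toNat audio_data 0

-- ===== PORT B =====
-- flat loop `for bit_idx in range(len(header_bits))` of B with its break;
-- bit_idx ≥ 0 and num_lsb > 0, so Python's divmod is Nat division/modulus.
def pvGoB (hb : List Int) (nl : Nat) (bitIdx : Nat) (ad : List Int) : List Int :=
  if bitIdx < hb.length then
    if ad.length ≤ bitIdx / nl then ad
    else pvGoB hb nl (bitIdx + 1)
      (ad.set (bitIdx / nl)
        (PySem.Int.bor
          (PySem.Int.band (ad.getD (bitIdx / nl) 0) (Int.not ((1 : Int) <<< (bitIdx % nl))))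
          ((hb.getD bitIdx 0) <<< (bitIdx % nl))))
  else ad
termination_by hb.length - bitIdx

def embed_header_alt (audio_data : List Int) (header_bits : List Int) (num_lsb : Int) : List Int :=
  if num_lsb ≤ 0 then audio_data
  else pvGoB header_bits num_lsb.toNat 0 audio_data

-- ===== PRECONDITION & SPEC =====
def Spec_embed_header (audio_data : List Int) (header_bits : List Int) (num_lsb : Int) (out : List Int) : Prop := out = embed_header_alt audio_data header_bits num_lsb
instance (audio_data : List Int) (header_bits : List Int) (num_lsb : Int) (out : List Int) : Decidable (Spec_embed_header audio_data header_bits num_lsb out) := by unfold Spec_embed_header; infer_instance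

-- ===== CLAIM (what is proved, stated in full; the proofs are below) =====
def Claim_equal_embed_header : Prop := ∀ (audio_data : List Int) (header_bits : List Int) (num_lsb : Int), Dom_embed_header audio_data header_bits num_lsb → Spec_embed_header audio_data header_bits num_lsb (embed_header audio_data header_bits num_lsb)

-- ===== LEMMAS AND PROOFS =====

theorem pv_getD_mid (pre : List Int) (x : Int) (rest : List Int) :
    (pre ++ x :: rest).getD pre.length 0 = x := by
  induction pre with
  | nil => rfl
  | cons a pre ih => simp only [List.cons_append, List.getD_cons_succ, List.length_cons]; exact ih

theorem pv_set_mid (pre : List Int) (x y : Int) (rest : List Int) :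
    (pre ++ x :: rest).set pre.length y = pre ++ y :: rest := by
  induction pre with
  | nil => rfl
  | cons a pre ih => simp only [List.cons_append, List.set_cons_succ, List.length_cons]; rw [ih]

-- inner loop result index: either all ls consumed or the header is exhausted
theorem pvInnerA_snd (hb : List Int) (ls : List Nat) (s : Int) (b : Nat) :
    (pvInnerA hb ls s b).2 = b + ls.length ∨ hb.length ≤ (pvInnerA hb ls s b).2 := by
  induction ls generalizing s b with
  | nil => simp [pvInnerA]
  | cons l ls ih =>
    by_cases h : hb.length ≤ b
    · simp [pvInnerA, h]
    · rw [pvInnerA, if_neg h]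
      rcases ih (PySem.Int.bor (PySem.Int.band s (Int.not ((1 : Int) <<< l))) ((hb.getD b 0) <<< l)) (b + 1) with h1 | h1
      · left; rw [h1, List.length_cons]; omega
      · right; exact h1

-- one element of A's inner loop, mirrored by nl steps of B's flat loop
theorem pv_round (hb : List Int) (nl : Nat) :
    ∀ n j (sample : Int) (pre rest : List Int), j + n = nl →
      pvGoB hb nl (pre.length * nl + j) (pre ++ sample :: rest) =
        pvGoB hb nl (pvInnerA hb (List.range' j n) sample (pre.length * nl + j)).2
          (pre ++ (pvInnerA hb (List.range' j n) sample (pre.length * nl + j)).1 :: rest) := by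
  intro n
  induction n with
  | zero => intro j sample pre rest _; simp [pvInnerA]
  | succ n ih =>
    intro j sample pre rest hjn
    have hj : j < nl := by omega
    by_cases hex : hb.length ≤ pre.length * nl + j
    · rw [List.range'_succ, pvInnerA, if_pos hex]
    · have hb' : pre.length * nl + j < hb.length := by omega
      have hdiv : (pre.length * nl + j) / nl = pre.length := by
        rw [Nat.add_comm, Nat.add_mul_div_right _ _ (by omega : 0 < nl),
            Nat.div_eq_of_lt hj, Nat.zero_add]
      have hmod : (pre.length * nl + j) % nl = j := by
        rw [Nat.add_comm, Nat.add_mul_mod_self_right, Nat.mod_eq_of_lt hj]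
      have hlen : ¬ (pre ++ sample :: rest).length ≤ (pre.length * nl + j) / nl := by
        rw [hdiv]; simp only [List.length_append, List.length_cons]; omega
      rw [pvGoB, if_pos hb', if_neg hlen, hdiv, hmod, pv_getD_mid, pv_set_mid,
          List.range'_succ, pvInnerA, if_neg (by omega : ¬ hb.length ≤ pre.length * nl + j)]
      have := ih (j + 1)
        (PySem.Int.bor (PySem.Int.band sample (Int.not ((1 : Int) <<< j))) ((hb.getD (pre.length * nl + j) 0) <<< j))
        pre rest (by omega)
      rw [show pre.length * nl + j + 1 = pre.length * nl + (j + 1) by omega]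
      exact this

-- main invariant: B's flat loop, started at a sample boundary, equals A's outer loop
theorem pv_main (hb : List Int) (nl : Nat) (hnl : 0 < nl) :
    ∀ (suf pre : List Int),
      pvGoB hb nl (pre.length * nl) (pre ++ suf) = pre ++ pvOuterA hb nl suf (pre.length * nl) := by
  intro suf
  induction suf with
  | nil =>
    intro pre
    rw [pvGoB]
    have hdc : pre.length * nl / nl = pre.length := Nat.mul_div_cancel _ hnl
    by_cases h : pre.length * nl < hb.length
    · rw [if_pos h, if_pos (by rw [hdc]; simp)]
      simp [pvOuterA]
    · rw [if_neg h]; simp [pvOuterA]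
  | cons a rest ih =>
    intro pre
    have hrd := pv_round hb nl nl 0 a pre rest (by omega)
    rw [Nat.add_zero] at hrd
    rw [← List.range_eq_range'] at hrd
    set p := pvInnerA hb (List.range nl) a (pre.length * nl) with hp
    by_cases hex : hb.length ≤ p.2
    · rw [hrd, pvGoB, if_neg (by omega)]
      rw [pvOuterA]
      simp only [← hp, if_pos hex]
    · have := pvInnerA_snd hb (List.range nl) a (pre.length * nl)
      rw [← hp] at this
      have hp2 : p.2 = (pre ++ [p.1]).length * nl := by
        rcases this with h1 | h1
        · simp [h1]; ring
        · omega
      rw [hrd, hp2]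
      have := ih (pre ++ [p.1])
      rw [List.append_assoc] at this
      simp only [List.cons_append, List.nil_append] at this
      rw [this, pvOuterA]
      simp only [← hp, if_neg hex, ← hp2]
      simp
  
-- num_lsb ≤ 0: A's inner range is empty, so A copies every sample unchanged
theorem pvOuterA_zero (hb : List Int) : ∀ (ad : List Int) (b : Nat),
    pvOuterA hb 0 ad b = ad := by
  intro ad
  induction ad with
  | nil => intro b; rfl
  | cons a rest ih =>
    intro b
    rw [pvOuterA]
    simp only [List.range_zero, pvInnerA]
    split_ifs
    · rfl
    · rw [ih]

-- ===== VERDICT (by name: the statement is the Claim_ definition above) =====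
theorem embed_header_spec : Claim_equal_embed_header := by
  intro ad hb nl _
  unfold Spec_embed_header embed_header embed_header_alt
  by_cases h : nl ≤ 0
  · rw [if_pos h]
    have : nl.toNat = 0 := by omega
    rw [this, pvOuterA_zero]
  · rw [if_neg h]
    have hnl : 0 < nl.toNat := by omega
    have := pv_main hb nl.toNat hnl ad []
    simpa using this.symm
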